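-- pv_equiv track=rewrite | github.com/rise-lang/shine | experiment/plot_experiment.py | get_runtime_index
-- ===== SOURCE A (Python) =====
-- def get_runtime_index(reader):
--     # get index from header
--
--     # get header
--     header = None
--     for row in reader:
--         header = row
--         break
--
--     # search for runtime in header
--     runtime_index = 0
--     counter = 0
--     for elem in header:
--         if(elem == 'runtime'):
--             runtime_index = counter
--         counter += 1
--
--
--     return runtime_index
-- ===== SOURCE B (Python) =====
-- def get_runtime_index(reader):
--     # B: read the header once, then scan it backwards and return at the
--     # first 'runtime' seen -- that is the last occurrence; default 0.
--     header = next(iter(reader), [])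
--     for i in range(len(header) - 1, -1, -1):
--         if header[i] == 'runtime':
--             return i
--     return 0
-- ===== Notes on version B (the rewrite author's own statement) =====
-- stated objective: simpler
-- what changed: Replaces the full forward scan with an overwritten accumulator and a manual counter by a backward scan over the header that early-returns at the first match (= last occurrence); the empty-reader TypeError of A becomes a plain 0.
import Mathlib
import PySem

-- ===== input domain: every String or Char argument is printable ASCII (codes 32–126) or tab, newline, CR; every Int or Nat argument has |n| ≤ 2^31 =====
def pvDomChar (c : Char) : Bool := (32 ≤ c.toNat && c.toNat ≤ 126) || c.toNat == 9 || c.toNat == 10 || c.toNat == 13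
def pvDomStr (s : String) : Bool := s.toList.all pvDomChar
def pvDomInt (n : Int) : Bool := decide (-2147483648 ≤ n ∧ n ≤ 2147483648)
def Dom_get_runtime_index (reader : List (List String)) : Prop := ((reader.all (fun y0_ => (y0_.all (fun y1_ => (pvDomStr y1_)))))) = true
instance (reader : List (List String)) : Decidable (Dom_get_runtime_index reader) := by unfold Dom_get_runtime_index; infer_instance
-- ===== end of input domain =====

-- B replaces A's forward scan with overwritten accumulator by a backward scan that
-- early-returns at the first 'runtime' (= last occurrence); simpler, same O(n) cost.


-- ===== PORT A =====
-- A's second loop: state (runtime_index, counter), both Python ints.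
def stepA (st : Int × Int) (elem : String) : Int × Int :=
  (if elem == "runtime" then st.2 else st.1, st.2 + 1)

def get_runtime_index (reader : List (List String)) : Int :=
  -- 'for row in reader: header = row; break'; on an empty reader A raises TypeError
  -- (header stays None) — excluded by Pre_, so the default [] is never reached there.
  let header := reader.headD []
  (header.foldl stepA (0, 0)).1

-- ===== PORT B =====
-- B's loop 'for i in range(len(header)-1, -1, -1)': altScan h (i+1) examines index i.
def altScan (header : List String) : Nat → Int
  | 0 => 0
  | Nat.succ i => if header.getD i "" == "runtime" then (i : Int) else altScan header i

def get_runtime_index_alt (reader : List (List String)) : Int :=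
  let header := reader.headD []   -- next(iter(reader), [])
  altScan header header.length

-- ===== PRECONDITION & SPEC =====
-- Pre_ excludes only the empty reader, on which Python A raises TypeError.
def Pre_get_runtime_index (reader : List (List String)) : Prop := reader ≠ []
instance (reader : List (List String)) : Decidable (Pre_get_runtime_index reader) := by
  unfold Pre_get_runtime_index; infer_instance
def pvWitness_get_runtime_index : List (List String) := [["a", "runtime", "b"]]

def Spec_get_runtime_index (reader : List (List String)) (out : Int) : Prop :=
  out = get_runtime_index_alt reader
instance (reader : List (List String)) (out : Int) : Decidable (Spec_get_runtime_index reader out) := by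
  unfold Spec_get_runtime_index; infer_instance

-- ===== CLAIM (what is proved, stated in full; the proofs are below) =====
def Claim_equal_get_runtime_index : Prop :=
  ∀ (reader : List (List String)), Dom_get_runtime_index reader →
    Pre_get_runtime_index reader →
    Spec_get_runtime_index reader (get_runtime_index reader)

-- ===== LEMMAS AND PROOFS =====
lemma stepA_snd (h : List String) (r c : Int) :
    (h.foldl stepA (r, c)).2 = c + h.length := by
  induction h generalizing r c with
  | nil => simp
  | cons e t ih => simp [stepA, ih]; ring

lemma altScan_append (h : List String) (e : String) (i : Nat) (hi : i ≤ h.length) :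
    altScan (h ++ [e]) i = altScan h i := by
  induction i with
  | zero => rfl
  | succ j ih =>
    have hj : j < h.length := hi
    simp only [altScan, List.getD, List.getElem?_append_left hj, ih (Nat.le_of_lt hj)]
    rfl

lemma main_lemma (h : List String) :
    (h.foldl stepA (0, 0)).1 = altScan h h.length := by
  induction h using List.reverseRecOn with
  | nil => rfl
  | append_singleton t e ih =>
    have hfold : List.foldl stepA (0, 0) (t ++ [e]) = stepA (List.foldl stepA (0, 0) t) e := by
      simp [List.foldl_append]
    have hget : (t ++ [e]).getD t.length "" = e := by
      simp [List.getD]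
    have hsnd : (List.foldl stepA ((0 : Int), (0 : Int)) t).2 = (t.length : Int) := by
      simpa using stepA_snd t 0 0
    simp only [hfold, stepA, List.length_append, List.length_singleton, altScan, hget,
      altScan_append t e t.length (le_refl _)]
    split <;> simp [hsnd, ih]

-- ===== VERDICT (by name: the statement is the Claim_ definition above) =====
theorem get_runtime_index_spec : Claim_equal_get_runtime_index := by
  intro reader _ _
  unfold Spec_get_runtime_index get_runtime_index get_runtime_index_alt
  exact main_lemma _
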